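-- pv_equiv track=rewrite | github.com/hzi09/Coding_Test | 프로그래머스/3/12938. 최고의 집합/최고의 집합.py | solution
-- ===== SOURCE A (Python) =====
-- def solution(n, s):
--     quo, rem = divmod(s, n)
--
--     if quo == 0 :
--         return [-1]
--
--     answer = [quo] * n
--     for i in range(rem) :
--         answer[i] += 1
--     return sorted(answer)
-- ===== SOURCE B (Python) =====
-- def solution(n, s):
--     if s // n == 0:
--         return [-1]
--     out = []
--     while n > 0:
--         q = s // n
--         out.append(q)
--         s -= q
--         n -= 1
--     return out
-- ===== Notes on version B (the rewrite author's own statement) =====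
-- stated objective: alternative
-- what changed: B is a greedy single pass: it repeatedly emits floor(remaining_s / remaining_n) and subtracts it, producing the sorted answer element by element, instead of A's divmod once, in-place increments of the first rem slots and a final sort.
import Mathlib
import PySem

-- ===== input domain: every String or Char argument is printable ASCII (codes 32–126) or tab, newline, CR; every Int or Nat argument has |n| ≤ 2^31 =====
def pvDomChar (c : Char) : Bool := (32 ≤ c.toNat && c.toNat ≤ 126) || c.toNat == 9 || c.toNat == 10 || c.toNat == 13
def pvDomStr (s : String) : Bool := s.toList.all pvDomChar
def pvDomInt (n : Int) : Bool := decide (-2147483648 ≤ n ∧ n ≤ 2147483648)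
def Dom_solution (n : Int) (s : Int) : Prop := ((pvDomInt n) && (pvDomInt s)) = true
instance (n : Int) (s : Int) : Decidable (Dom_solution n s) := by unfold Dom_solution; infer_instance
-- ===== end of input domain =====

-- B replaces A's "divmod once, increment first rem slots, sort" by a greedy single pass
-- emitting floor(remaining s / remaining n) each step; objective: alternative (no sort, one loop).

-- ===== PORT A =====
def solution (n : Int) (s : Int) : List Int :=
  let quo := PySem.Int.floordiv s n
  let rem := PySem.Int.mod s n
  if quo = 0 then [-1]
  else
    let answer := List.replicate n.toNat quo
    let answer := (PySem.List.pyRange 0 rem 1).foldl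
      (fun acc i => PySem.List.pySetD acc i (PySem.List.pyGetD acc i 0 + 1)) answer
    PySem.List.sorted answer (fun x => x) false

-- ===== PORT B =====
-- the while loop of Source B: fuel = number of remaining iterations (= current n, which
-- decreases by exactly 1 per iteration; n ≤ 0 never enters the loop → fuel n.toNat)
def bLoop : Nat → Int → List Int
  | 0, _ => []
  | k+1, s =>
    let q := PySem.Int.floordiv s ((k : Int) + 1)
    q :: bLoop k (s - q)

def solution_alt (n : Int) (s : Int) : List Int :=
  if PySem.Int.floordiv s n = 0 then [-1]
  else bLoop n.toNat s

-- ===== PRECONDITION & SPEC =====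
-- Pre_ excludes exactly n = 0, where divmod(s, 0) / s // 0 raises ZeroDivisionError in A (and in B).
def Pre_solution (n : Int) (s : Int) : Prop := n ≠ 0
instance (n : Int) (s : Int) : Decidable (Pre_solution n s) := by unfold Pre_solution; infer_instance
def pvWitness_solution : Int × Int := (3, 14)

def Spec_solution (n : Int) (s : Int) (out : List Int) : Prop := out = solution_alt n s
instance (n : Int) (s : Int) (out : List Int) : Decidable (Spec_solution n s out) := by unfold Spec_solution; infer_instance

-- ===== CLAIM (what is proved, stated in full; the proofs are below) =====
def Claim_equal_solution : Prop := ∀ (n : Int) (s : Int), Dom_solution n s → Pre_solution n s → Spec_solution n s (solution n s)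

-- ===== LEMMAS AND PROOFS =====

-- A's increment loop over range(k) turns [c]*m into [c+1]*k ++ [c]*(m-k).
theorem pv_loop (k m : Nat) (c : Int) (hk : k ≤ m) :
    (PySem.List.pyRange 0 (k : Int) 1).foldl
      (fun acc i => PySem.List.pySetD acc i (PySem.List.pyGetD acc i 0 + 1))
      (List.replicate m c)
    = List.replicate k (c + 1) ++ List.replicate (m - k) c := by
  induction k with
  | zero => simp [PySem.List.pyRange_one_eq_nil]
  | succ k ih =>
    have hk' : k ≤ m := Nat.le_of_succ_le hk
    have hsplit : PySem.List.pyRange 0 ((k + 1 : Nat) : Int) 1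
        = PySem.List.pyRange 0 (k : Int) 1 ++ [(k : Int)] := by
      push_cast
      exact PySem.List.pyRange_one_succ_right (by positivity)
    rw [hsplit, List.foldl_append, ih hk']
    simp only [List.foldl_cons, List.foldl_nil]
    have hlen : (k : Int) < (((List.replicate k (c + 1) ++ List.replicate (m - k) c).length : Nat) : Int) := by
      simp; omega
    have hget : PySem.List.pyGetD (List.replicate k (c + 1) ++ List.replicate (m - k) c) (k : Int) 0 = c := by
      rw [PySem.List.pyGetD_eq_getElem _ _ _ hlen]
      rw [List.getElem_append_right (by simp)]
      · simp [List.getElem_replicate]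
      · positivity
    rw [hget, PySem.List.pySetD_natCast]
    have hmk : m - k = (m - (k + 1)) + 1 := by omega
    rw [hmk, List.replicate_succ]
    rw [List.set_append, List.replicate_succ']
    simp

-- B's greedy loop with positive fuel produces the sorted multiset directly.
theorem pv_bLoop (k : Nat) : ∀ (s : Int),
    bLoop (k + 1) s
      = List.replicate ((k + 1) - (PySem.Int.mod s ((k : Int) + 1)).toNat)
          (PySem.Int.floordiv s ((k : Int) + 1))
        ++ List.replicate (PySem.Int.mod s ((k : Int) + 1)).toNat
          (PySem.Int.floordiv s ((k : Int) + 1) + 1) := by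
  induction k with
  | zero =>
    intro s
    have h1 : PySem.Int.floordiv s 1 = s := by
      rw [PySem.Int.floordiv_eq_ediv_of_pos (by norm_num)]; simp
    have h2 : PySem.Int.mod s 1 = 0 := by
      rw [PySem.Int.mod_eq_emod_of_pos (by norm_num)]; simp
    rw [show bLoop 1 s = [PySem.Int.floordiv s ((0:Int)+1)] from rfl]
    norm_num [h1, h2]
  | succ k ih =>
    intro s
    set n : Int := (k : Int) + 1 + 1 with hn
    have hnpos : (0 : Int) < n := by positivity
    set q := PySem.Int.floordiv s n with hq
    set r := PySem.Int.mod s n with hr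
    have heq : q * n + r = s := PySem.Int.floordiv_mul_add_mod s n
    have hr0 : 0 ≤ r := by rw [hr]; exact PySem.Int.mod_nonneg (a := s) hnpos
    have hrlt : r < n := by rw [hr]; exact PySem.Int.mod_lt (a := s) hnpos
    have hstep : bLoop (k + 1 + 1) s = q :: bLoop (k + 1) (s - q) := by
      simp only [bLoop]
      push_cast
      rfl
    rw [hstep, ih (s - q)]
    push_cast
    rw [← hn, ← hq, ← hr]
    have hs' : s - q = q * ((k : Int) + 1) + r := by rw [← heq, hn]; ring
    by_cases hcase : r < (k : Int) + 1
    · have hfd : PySem.Int.floordiv (s - q) ((k : Int) + 1) = q := by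
        rw [PySem.Int.floordiv_eq_iff_of_pos (by positivity)]
        constructor <;> nlinarith
      have hmd : PySem.Int.mod (s - q) ((k : Int) + 1) = r := by
        have h := PySem.Int.floordiv_mul_add_mod (s - q) ((k : Int) + 1)
        rw [hfd] at h; omega
      rw [hfd, hmd]
      have h1 : (k + 1 + 1) - r.toNat = ((k + 1) - r.toNat) + 1 := by omega
      rw [h1, List.replicate_succ]
      simp
    · have hreq : r = (k : Int) + 1 := by omega
      have hfd : PySem.Int.floordiv (s - q) ((k : Int) + 1) = q + 1 := by
        rw [PySem.Int.floordiv_eq_iff_of_pos (by positivity)]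
        constructor <;> nlinarith
      have hmd : PySem.Int.mod (s - q) ((k : Int) + 1) = 0 := by
        have h := PySem.Int.floordiv_mul_add_mod (s - q) ((k : Int) + 1)
        rw [hfd] at h; nlinarith
      rw [hfd, hmd]
      have h1 : r.toNat = k + 1 := by omega
      rw [h1]
      simp [List.replicate_succ]

theorem pv_main (n s : Int) (hn : n ≠ 0) : solution n s = solution_alt n s := by
  unfold solution solution_alt
  by_cases hg : PySem.Int.floordiv s n = 0
  · simp [hg]
  · simp only [hg, if_false]
    set rem := PySem.Int.mod s n with hrem
    set quo := PySem.Int.floordiv s n with hquo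
    rcases lt_or_gt_of_ne hn with hneg | hpos
    · -- n < 0 : rem ≤ 0, A's list is empty, B's fuel is 0
      have hb := PySem.Int.mod_neg_bounds (a := s) hneg
      have h1 : PySem.List.pyRange 0 rem 1 = [] :=
        PySem.List.pyRange_one_eq_nil (by omega)
      have h2 : n.toNat = 0 := by omega
      rw [h1, h2]
      simp [PySem.List.sorted, bLoop]
    · -- n > 0 : 0 ≤ rem < n
      have h0 : 0 ≤ rem := PySem.Int.mod_nonneg (a := s) hpos
      have h1 : rem < n := PySem.Int.mod_lt (a := s) hpos
      have hkm : rem.toNat ≤ n.toNat := by omega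
      have hcast : ((rem.toNat : Nat) : Int) = rem := Int.toNat_of_nonneg h0
      have hloop := pv_loop rem.toNat n.toNat quo hkm
      rw [hcast] at hloop
      rw [hloop]
      -- B's side
      obtain ⟨k, hk⟩ : ∃ k, n.toNat = k + 1 := ⟨n.toNat - 1, by omega⟩
      have hkc : ((k : Int) + 1) = n := by
        have hnn : ((n.toNat : Nat) : Int) = n := Int.toNat_of_nonneg (by omega)
        rw [hk] at hnn; push_cast at hnn; omega
      rw [hk, pv_bLoop k s, hkc, ← hquo, ← hrem, ← hk]
      have hnk : n.toNat - rem.toNat = (n - rem).toNat := by omega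
      rw [hnk]
      apply PySem.List.sorted_id_eq_of_perm_of_pairwise
      · exact List.perm_append_comm
      · rw [List.pairwise_append]
        refine ⟨List.pairwise_replicate.mpr (by simp), List.pairwise_replicate.mpr (by simp), ?_⟩
        intro x hx y hy
        rw [List.eq_of_mem_replicate hx, List.eq_of_mem_replicate hy]
        omega

-- ===== VERDICT (by name: the statement is the Claim_ definition above) =====
theorem solution_spec : Claim_equal_solution := by
  intro n s _ hpre
  unfold Spec_solution
  exact pv_main n s hpre
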